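-- pv_equiv track=rewrite | github.com/Krimaxev/Algoritms_and_data_structures | lab_6/task_4/src/main.py | execute_operations
-- ===== SOURCE A (Python) =====
-- class SuffixMap:
--     def __init__(self):
--         self.data = {}
--         self.order = []
--
--     def put(self, x, y):
--         if x not in self.data:
--             self.order.append(x)
--         self.data[x] = y
--
--     def get(self, x):
--         return self.data.get(x, "<none>")
--
--     def prev(self, x):
--         if x not in self.data:
--             return "<none>"
--         index = self.order.index(x)
--         return self.data[self.order[index - 1]] if index > 0 else "<none>"
--
--     def next(self, x):
--         if x not in self.data:
--             return "<none>"
--         index = self.order.index(x)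
--         return self.data[self.order[index + 1]] if index < len(self.order) - 1 else "<none>"
--
--     def delete(self, x):
--         if x in self.data:
--             del self.data[x]
--             self.order.remove(x)
--
-- def execute_operations(operations):
--     suffix_map = SuffixMap()
--     results = []
--
--     for operation in operations:
--         cmd = operation[0]
--         if cmd == 'put':
--             suffix_map.put(operation[1], operation[2])
--         elif cmd == 'get':
--             results.append(suffix_map.get(operation[1]))
--         elif cmd == 'prev':
--             results.append(suffix_map.prev(operation[1]))
--         elif cmd == 'next':
--             results.append(suffix_map.next(operation[1]))
--         elif cmd == 'delete':
--             suffix_map.delete(operation[1])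
--
--     return results
-- ===== SOURCE B (Python) =====
-- def execute_operations(operations):
--     # Doubly-linked list over dicts: val holds values, prv/nxt hold neighbor
--     # keys (None = end), head/tail the list ends.  prev/next/delete read and
--     # patch pointers directly: no order list, no .index scan, no .remove scan.
--     val = {}
--     prv = {}
--     nxt = {}
--     head = None
--     tail = None
--     results = []
--     for operation in operations:
--         cmd = operation[0]
--         if cmd == 'put':
--             x, y = operation[1], operation[2]
--             if x in val:
--                 val[x] = y
--             else:
--                 val[x] = y
--                 prv[x] = tail
--                 nxt[x] = None
--                 if tail is None:
--                     head = x
--                 else: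
--                     nxt[tail] = x
--                 tail = x
--         elif cmd == 'get':
--             results.append(val.get(operation[1], "<none>"))
--         elif cmd == 'prev':
--             x = operation[1]
--             if x in val:
--                 p = prv[x]
--                 results.append(val[p] if p is not None else "<none>")
--             else:
--                 results.append("<none>")
--         elif cmd == 'next':
--             x = operation[1]
--             if x in val:
--                 n = nxt[x]
--                 results.append(val[n] if n is not None else "<none>")
--             else:
--                 results.append("<none>")
--         elif cmd == 'delete':
--             x = operation[1]
--             if x in val:
--                 p = prv.pop(x)
--                 n = nxt.pop(x)
--                 del val[x]
--                 if p is None: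
--                     head = n
--                 else:
--                     nxt[p] = n
--                 if n is None:
--                     tail = p
--                 else:
--                     prv[n] = p
--     return results
-- ===== Notes on version B (the rewrite author's own statement) =====
-- stated objective: alternative
-- what changed: Replaced the dict-plus-order-list (prev/next/delete via list.index / list.remove linear scans over the insertion order) by a doubly-linked list kept in dicts of neighbor pointers (prv/nxt plus head/tail), so neighbors come from constant-time pointer lookups instead of positional scans.
import Mathlib
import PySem

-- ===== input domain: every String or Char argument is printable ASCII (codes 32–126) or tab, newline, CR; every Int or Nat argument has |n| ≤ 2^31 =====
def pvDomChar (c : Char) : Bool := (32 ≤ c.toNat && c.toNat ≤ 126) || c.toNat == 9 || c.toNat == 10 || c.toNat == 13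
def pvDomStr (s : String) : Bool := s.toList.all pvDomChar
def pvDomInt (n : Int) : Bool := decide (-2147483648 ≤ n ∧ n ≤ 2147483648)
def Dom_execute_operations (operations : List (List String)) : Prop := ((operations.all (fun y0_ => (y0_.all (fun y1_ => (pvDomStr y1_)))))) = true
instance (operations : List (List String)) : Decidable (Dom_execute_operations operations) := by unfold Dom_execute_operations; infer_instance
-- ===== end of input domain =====

-- B replaces A's dict+order-list (list.index / list.remove positional scans for prev/next/delete)
-- by a doubly-linked list kept in neighbor-pointer dicts (prv/nxt + head/tail); objective: alternative.

-- ===== PORT A =====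
-- SuffixMap's state is the pair (data, order); each method is a helper, as in the Python.
def sm_put (data : PySem.Dict String String) (order : List String) (x y : String) :
    PySem.Dict String String × List String :=
  let order' := if data.contains x then order else order ++ [x]
  (data.insert x y, order')

def sm_get (data : PySem.Dict String String) (x : String) : String :=
  data.getD x "<none>"

def sm_prev (data : PySem.Dict String String) (order : List String) (x : String) : String :=
  if data.contains x = false then "<none>"
  else
    match PySem.List.index? order x with
    | none => "<none>"       -- unreachable: x is a key, hence x ∈ order, so .index cannot raise
    | some i =>
      if 0 < i then
        -- data[order[i-1]]: 0 ≤ i-1 < len(order) and the key is present, so getD is exact here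
        data.getD (order.getD (i - 1) "") "<none>"
      else "<none>"

def sm_next (data : PySem.Dict String String) (order : List String) (x : String) : String :=
  if data.contains x = false then "<none>"
  else
    match PySem.List.index? order x with
    | none => "<none>"       -- unreachable, as in sm_prev
    | some i =>
      if i < order.length - 1 then
        -- data[order[i+1]]: i+1 < len(order) and the key is present, so getD is exact here
        data.getD (order.getD (i + 1) "") "<none>"
      else "<none>"

def sm_delete (data : PySem.Dict String String) (order : List String) (x : String) :
    PySem.Dict String String × List String :=
  if data.contains x then
    -- order.remove(x): x ∈ order here, so remove? is some and getD is exact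
    (data.erase x, (PySem.List.remove? order x).getD order)
  else (data, order)

def aStep (st : PySem.Dict String String × List String × List String) (op : List String) :
    PySem.Dict String String × List String × List String :=
  match op with
  | [] => st                 -- unreachable under Pre_: Python raises IndexError on operation[0]
  | cmd :: args =>
    -- args.getD k "": operation[k+1]; in range under Pre_, so getD is exact on admitted inputs
    let data := st.1; let order := st.2.1; let res := st.2.2
    if cmd = "put" then
      let p := sm_put data order (args.getD 0 "") (args.getD 1 "")
      (p.1, p.2, res)
    else if cmd = "get" then (data, order, res ++ [sm_get data (args.getD 0 "")])
    else if cmd = "prev" then (data, order, res ++ [sm_prev data order (args.getD 0 "")])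
    else if cmd = "next" then (data, order, res ++ [sm_next data order (args.getD 0 "")])
    else if cmd = "delete" then
      let p := sm_delete data order (args.getD 0 "")
      (p.1, p.2, res)
    else st

def execute_operations (operations : List (List String)) : List String :=
  (operations.foldl aStep (PySem.Dict.empty, [], [])).2.2

-- ===== PORT B =====
-- B's whole loop state: the value dict, the two neighbor-pointer dicts, the ends, and the results.
structure LLState where
  val : PySem.Dict String String
  prv : PySem.Dict String (Option String)
  nxt : PySem.Dict String (Option String)
  head : Option String
  tail : Option String
  res : List String

def bStep (s : LLState) (op : List String) : LLState :=
  match op with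
  | [] => s                  -- unreachable under Pre_, as in aStep
  | cmd :: args =>
    if cmd = "put" then
      let x := args.getD 0 ""; let y := args.getD 1 ""
      if s.val.contains x then { s with val := s.val.insert x y }
      else
        let val' := s.val.insert x y
        let prv' := s.prv.insert x s.tail
        let nxt' := s.nxt.insert x none
        match s.tail with
        | none => { s with val := val', prv := prv', nxt := nxt', head := some x, tail := some x }
        | some t => { s with val := val', prv := prv', nxt := nxt'.insert t (some x), tail := some x }
    else if cmd = "get" then
      { s with res := s.res ++ [s.val.getD (args.getD 0 "") "<none>"] }
    else if cmd = "prev" then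
      let x := args.getD 0 ""
      if s.val.contains x then
        match s.prv.getD x none with   -- prv[x]: key present whenever x ∈ val, so getD is exact
        | some p => { s with res := s.res ++ [s.val.getD p "<none>"] }  -- val[p]: p present, getD exact
        | none => { s with res := s.res ++ ["<none>"] }
      else { s with res := s.res ++ ["<none>"] }
    else if cmd = "next" then
      let x := args.getD 0 ""
      if s.val.contains x then
        match s.nxt.getD x none with   -- nxt[x]: key present whenever x ∈ val, so getD is exact
        | some n => { s with res := s.res ++ [s.val.getD n "<none>"] }  -- val[n]: n present, getD exact
        | none => { s with res := s.res ++ ["<none>"] }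
      else { s with res := s.res ++ ["<none>"] }
    else if cmd = "delete" then
      let x := args.getD 0 ""
      if s.val.contains x then
        let p := s.prv.getD x none     -- prv.pop(x): present, so the popped value is getD, removal is erase
        let n := s.nxt.getD x none
        { val := s.val.erase x,
          prv := match n with | none => s.prv.erase x | some nk => (s.prv.erase x).insert nk p,
          nxt := match p with | none => s.nxt.erase x | some pk => (s.nxt.erase x).insert pk n,
          head := match p with | none => n | some _ => s.head,
          tail := match n with | none => p | some _ => s.tail,
          res := s.res }
      else s
    else s

def execute_operations_alt (operations : List (List String)) : List String :=
  (operations.foldl bStep ⟨PySem.Dict.empty, PySem.Dict.empty, PySem.Dict.empty, none, none, []⟩).res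

-- ===== PRECONDITION & SPEC =====
-- Pre_ excludes only malformed operations, on which Python A raises IndexError
-- (an empty operation, or a put/get/prev/next/delete without its arguments).
def Pre_execute_operations (operations : List (List String)) : Prop :=
  ∀ op ∈ operations, op ≠ [] ∧
    (op.headD "" = "put" → 2 < op.length) ∧
    ((op.headD "" = "get" ∨ op.headD "" = "prev" ∨ op.headD "" = "next" ∨ op.headD "" = "delete") →
      1 < op.length)

instance (operations : List (List String)) : Decidable (Pre_execute_operations operations) := by
  unfold Pre_execute_operations; infer_instance

def pvWitness_execute_operations : List (List String) :=
  [["put", "a", "1"], ["put", "b", "2"], ["put", "c", "3"], ["prev", "b"], ["next", "b"],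
   ["get", "a"], ["delete", "b"], ["next", "a"], ["prev", "x"]]

def Spec_execute_operations (operations : List (List String)) (out : List String) : Prop :=
  out = execute_operations_alt operations
instance (operations : List (List String)) (out : List String) :
    Decidable (Spec_execute_operations operations out) := by
  unfold Spec_execute_operations; infer_instance

-- ===== CLAIM (what is proved, stated in full; the proofs are below) =====
def Claim_equal_execute_operations : Prop :=
  ∀ (operations : List (List String)), Dom_execute_operations operations →
    Pre_execute_operations operations →
    Spec_execute_operations operations (execute_operations operations)

-- ===== LEMMAS AND PROOFS =====

-- the linked-list invariant: head/tail are the ends of the insertion order, and at every key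
-- the pointer dicts hold exactly its neighbors in the insertion order
def LLInv (order : List String) (s : LLState) : Prop :=
  s.head = order.head? ∧ s.tail = order.getLast? ∧
  ∀ l1 x l2, order = l1 ++ x :: l2 →
    s.prv.getD x none = l1.getLast? ∧ s.nxt.getD x none = l2.head?

lemma keys_erase (ν : Type) (d : PySem.Dict String ν) (x : String) :
    (d.erase x).keys = d.keys.filter (fun k => !(k == x)) := by
  cases d with
  | mk l =>
    simp [PySem.Dict.erase, PySem.Dict.keys, List.filter_map]
    rfl

lemma get?_erase_of_ne (ν : Type) (d : PySem.Dict String ν) (x y : String) (h : y ≠ x) :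
    (d.erase x).get? y = d.get? y := by
  cases d with
  | mk l =>
    induction l with
    | nil => rfl
    | cons p t ih =>
      cases p with
      | mk k v =>
        by_cases hk : k = x
        · subst hk
          have hky : (k == y) = false := by
            simp only [beq_eq_false_iff_ne]; exact fun e => h e.symm
          simp only [PySem.Dict.erase, PySem.Dict.get?_mk_cons, hky,
            List.filter_cons, beq_self_eq_true, Bool.not_true] at ih ⊢
          simpa using ih
        · have hkx : (k == x) = false := by simp [hk]
          simp only [PySem.Dict.erase, List.filter_cons, hkx, Bool.not_false, if_pos,
            PySem.Dict.get?_mk_cons] at ih ⊢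
          by_cases hky : k = y
          · simp [hky]
          · simp only [show (k == y) = false by simp [hky], Bool.false_eq_true, if_false]
            simpa using ih

lemma getD_erase_of_ne (ν : Type) (d : PySem.Dict String ν) (x y : String) (v : ν) (h : y ≠ x) :
    (d.erase x).getD y v = d.getD y v := by
  rw [PySem.Dict.getD_eq_get?_getD, PySem.Dict.getD_eq_get?_getD, get?_erase_of_ne ν d x y h]

lemma idxOf?_first (l₁ l₂ : List String) (x : String) (h : x ∉ l₁) :
    List.idxOf? x (l₁ ++ x :: l₂) = some l₁.length := by
  induction l₁ with
  | nil => simp [List.idxOf?, List.findIdx?_cons]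
  | cons a t ih =>
    simp only [List.mem_cons, not_or] at h
    have hax : (a == x) = false := beq_eq_false_iff_ne.mpr (fun e => h.1 e.symm)
    have ihx := ih h.2
    simp only [List.idxOf?] at ihx ⊢
    rw [List.cons_append, List.findIdx?_cons]
    simp [hax, ihx]

-- splitting keys at a present key x, with x in neither side (keys are Nodup)
lemma keys_split (d : PySem.Dict String String) (x : String) (hnd : d.keys.Nodup)
    (hx : x ∈ d.keys) :
    ∃ k1 k2, d.keys = k1 ++ x :: k2 ∧ x ∉ k1 ∧ x ∉ k2 := by
  obtain ⟨k1, k2, h⟩ := List.append_of_mem hx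
  refine ⟨k1, k2, h, ?_, ?_⟩
  · rw [h] at hnd
    rcases List.nodup_append.mp hnd with ⟨-, h2, hdisj⟩
    intro hx1; exact hdisj x hx1 x (by simp) rfl
  · rw [h] at hnd
    rcases List.nodup_append.mp hnd with ⟨-, h2, -⟩
    exact (List.nodup_cons.mp h2).1

lemma getLast?_of_cons (p : String) (t : List String) :
    (p :: t).getLast? = some ((p :: t).getLast (by simp)) := by
  rw [List.getLast?_eq_getElem?, List.getLast_eq_getElem, List.getElem?_eq_getElem (by simp)]
  rfl

-- A's prev, characterized by the split of the order at x
lemma sm_prev_char (d : PySem.Dict String String) (x : String) (k1 k2 : List String)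
    (hc : d.contains x = true) (hk : d.keys = k1 ++ x :: k2) (h1 : x ∉ k1) :
    sm_prev d d.keys x =
      match k1.getLast? with
      | some p => d.getD p "<none>"
      | none => "<none>" := by
  have hidx : PySem.List.index? d.keys x = some k1.length := by
    simp only [PySem.List.index?]; rw [hk]; exact idxOf?_first _ _ _ h1
  simp only [sm_prev, hc, Bool.true_eq_false, if_false, hidx]
  cases k1 with
  | nil => simp
  | cons c t =>
    rw [getLast?_of_cons]
    simp only [List.length_cons, Nat.succ_sub_one, Nat.succ_pos, if_true]
    have hkey : d.keys.getD t.length "" = (c :: t).getLast (by simp) := by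
      rw [hk, List.getD_eq_getElem?_getD, List.getElem?_append_left (by simp),
        List.getLast_eq_getElem]
      rw [List.getElem?_eq_getElem (by simp)]
      simp only [Option.getD_some]
      congr 1
    rw [hkey]

lemma sm_next_char (d : PySem.Dict String String) (x : String) (k1 k2 : List String)
    (hc : d.contains x = true) (hk : d.keys = k1 ++ x :: k2) (h1 : x ∉ k1) :
    sm_next d d.keys x =
      match k2.head? with
      | some n => d.getD n "<none>"
      | none => "<none>" := by
  have hidx : PySem.List.index? d.keys x = some k1.length := by
    simp only [PySem.List.index?]; rw [hk]; exact idxOf?_first _ _ _ h1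
  simp only [sm_next, hc, Bool.true_eq_false, if_false, hidx]
  have hlen : d.keys.length = k1.length + 1 + k2.length := by rw [hk]; simp; omega
  cases k2 with
  | nil =>
    rw [if_neg (by simp only [List.length_nil] at hlen; omega)]
    rfl
  | cons n r =>
    rw [if_pos (by simp only [List.length_cons] at hlen; omega)]
    have hkey : d.keys.getD (k1.length + 1) "" = n := by
      rw [hk, List.getD_eq_getElem?_getD, List.getElem?_append_right (by simp)]
      simp
    rw [hkey]
    rfl

-- splitting an appended singleton
lemma append_singleton_split (order : List String) (x : String) (hx : x ∉ order)
    (l1 : List String) (y : String) (l2 : List String) (h : order ++ [x] = l1 ++ y :: l2) :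
    (y = x ∧ l1 = order ∧ l2 = []) ∨
    (y ≠ x ∧ ∃ l2', order = l1 ++ y :: l2' ∧ l2 = l2' ++ [x]) := by
  rcases List.eq_nil_or_concat l2 with h2 | ⟨l2', z, h2⟩
  · subst h2
    obtain ⟨ho, hxy⟩ := List.append_inj' h rfl
    exact Or.inl ⟨by simpa using hxy.symm, ho.symm, rfl⟩
  · subst h2
    rw [List.concat_eq_append] at h ⊢
    rw [show l1 ++ y :: (l2' ++ [z]) = (l1 ++ y :: l2') ++ [z] by simp] at h
    obtain ⟨ho, hxz⟩ := List.append_inj' h rfl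
    have hz : x = z := by simpa using hxz
    subst hz
    have hy : y ≠ x := fun e => hx (by rw [ho]; simp [e])
    exact Or.inr ⟨hy, l2', ho, rfl⟩

-- splitting a concatenation
lemma middle_split (l1 l2 a : List String) (y : String) (b : List String)
    (h : l1 ++ l2 = a ++ y :: b) :
    (∃ b', l1 = a ++ y :: b' ∧ b = b' ++ l2) ∨ (∃ a', l2 = a' ++ y :: b ∧ a = l1 ++ a') := by
  induction l1 generalizing a with
  | nil => exact Or.inr ⟨a, by simpa using h, by simp⟩
  | cons c t ih =>
    cases a with
    | nil =>
      simp only [List.nil_append, List.cons_append, List.cons.injEq] at h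
      exact Or.inl ⟨t, by simp [h.1], h.2.symm⟩
    | cons c' a'' =>
      simp only [List.cons_append, List.cons.injEq] at h
      rcases ih a'' h.2 with ⟨b', h1, h2⟩ | ⟨a', h1, h2⟩
      · exact Or.inl ⟨b', by simp [h.1, h1], h2⟩
      · exact Or.inr ⟨a', h1, by simp [h.1, h2]⟩

lemma nodup_snoc (l : List String) (x : String) (h : l.Nodup) (hx : x ∉ l) :
    (l ++ [x]).Nodup := by
  simp [List.nodup_append, h]
  exact fun a ha e => hx (e ▸ ha)

-- one step of the simulation: A's state is (s.val, s.val.keys, s.res) and stays so, LLInv is kept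
lemma step_sim (s : LLState) (op : List String) (hnd : s.val.keys.Nodup)
    (hinv : LLInv s.val.keys s) :
    aStep (s.val, s.val.keys, s.res) op =
      ((bStep s op).val, (bStep s op).val.keys, (bStep s op).res) ∧
    (bStep s op).val.keys.Nodup ∧ LLInv (bStep s op).val.keys (bStep s op) := by
  obtain ⟨hhead, htail, hptr⟩ := hinv
  cases op with
  | nil => exact ⟨rfl, hnd, hhead, htail, hptr⟩
  | cons cmd args =>
    simp only [aStep, bStep]
    by_cases h1 : cmd = "put"
    · rw [if_pos h1, if_pos h1]
      by_cases hc : s.val.contains (args.getD 0 "")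
      · rw [if_pos hc]
        simp only [sm_put, hc, if_pos]
        rw [PySem.Dict.keys_insert_of_contains s.val (args.getD 1 "") hc]
        exact ⟨rfl, hnd, hhead, htail, hptr⟩
      · rw [if_neg hc]
        simp only [Bool.not_eq_true] at hc
        have hkeys' := PySem.Dict.keys_insert_of_not_contains s.val (args.getD 1 "") hc
        have hxmem : args.getD 0 "" ∉ s.val.keys := fun hm =>
          by rw [(PySem.Dict.contains_iff_mem_keys s.val _).2 hm] at hc; cases hc
        cases htl : s.val.keys.getLast? with
        | none =>
          have hknil : s.val.keys = [] := List.getLast?_eq_none_iff.mp htl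
          rw [htail, htl]
          simp only [sm_put, hc, Bool.false_eq_true, if_false]
          refine ⟨(by rw [hkeys']), (by rw [hkeys']; exact nodup_snoc _ _ hnd hxmem), ?_⟩
          rw [hkeys', hknil]
          refine ⟨by simp, by simp [htl, hknil], ?_⟩
          intro l1 z l2 hsplit
          rcases append_singleton_split [] _ (by simp) l1 z l2 (by simpa [hknil] using hsplit) with
            ⟨hz, hl1, hl2⟩ | ⟨hz, l2', hord, hl2⟩
          · subst hz; subst hl1; subst hl2
            constructor
            · dsimp only
              rw [PySem.Dict.getD_insert]
              simp [htl, hknil]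
            · dsimp only
              rw [PySem.Dict.getD_insert]
              simp
          · simp at hord
        | some t =>
          rw [htail, htl]
          simp only [sm_put, hc, Bool.false_eq_true, if_false]
          have htmem : t ∈ s.val.keys := by
            have := List.getLast?_eq_some_iff.mp htl
            obtain ⟨l', hl'⟩ := this
            rw [hl']; simp
          have htx : t ≠ args.getD 0 "" := fun e => hxmem (e ▸ htmem)
          refine ⟨(by rw [hkeys']), (by rw [hkeys']; exact nodup_snoc _ _ hnd hxmem), ?_⟩
          rw [hkeys']
          have hknn : s.val.keys ≠ [] := fun e => by rw [e] at htl; cases htl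
          refine ⟨?_, ?_, ?_⟩
          · show s.head = (s.val.keys ++ [args.getD 0 ""]).head?
            rw [List.head?_append, hhead]
            cases hk : s.val.keys with
            | nil => exact absurd hk hknn
            | cons c cs => rfl
          · show some (args.getD 0 "") = (s.val.keys ++ [args.getD 0 ""]).getLast?
            rw [List.getLast?_append_of_ne_nil _ (by simp)]
            rfl
          · intro l1 z l2 hsplit
            rcases append_singleton_split s.val.keys _ hxmem l1 z l2 hsplit with
              ⟨hz, hl1, hl2⟩ | ⟨hz, l2', hord, hl2⟩
            · subst hz; subst hl1; subst hl2
              constructor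
              · dsimp only
                rw [PySem.Dict.getD_insert]
                simp [htl]
              · dsimp only
                rw [PySem.Dict.getD_insert, if_neg (Ne.symm htx),
                  PySem.Dict.getD_insert, if_pos rfl]
                rfl
            · obtain ⟨hp, hn⟩ := hptr l1 z l2' hord
              constructor
              · dsimp only
                rw [PySem.Dict.getD_insert, if_neg hz, hp]
              · subst hl2
                by_cases hzt : z = t
                · have hl2nil : l2' = [] := by
                    by_contra hne
                    have hglast : s.val.keys.getLast? = l2'.getLast? := by
                      rw [hord, List.getLast?_append_of_ne_nil _ (by simp),
                        show z :: l2' = [z] ++ l2' from rfl,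
                        List.getLast?_append_of_ne_nil _ hne]
                    rw [htl] at hglast
                    have hzl2 : z ∈ l2' := by
                      obtain ⟨l'', hl''⟩ := List.getLast?_eq_some_iff.mp hglast.symm
                      rw [hl'', ← hzt]; simp
                    have hndk := hnd
                    rw [hord] at hndk
                    rcases List.nodup_append.mp hndk with ⟨-, h2, -⟩
                    exact (List.nodup_cons.mp h2).1 hzl2
                  subst hl2nil
                  dsimp only
                  rw [PySem.Dict.getD_insert, if_pos hzt]
                  rfl
                · have hl2ne : l2' ≠ [] := by
                    intro he
                    subst he
                    have : s.val.keys.getLast? = some z := by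
                      rw [hord, List.getLast?_append_of_ne_nil _ (by simp)]
                      rfl
                    rw [htl] at this
                    exact hzt (by injection this with h; exact h.symm)
                  dsimp only
                  rw [PySem.Dict.getD_insert, if_neg hzt,
                    PySem.Dict.getD_insert, if_neg hz, hn]
                  rw [List.head?_append]
                  cases hl : l2' with
                  | nil => exact absurd hl hl2ne
                  | cons c cs => rfl
    · rw [if_neg h1, if_neg h1]
      by_cases h2 : cmd = "get"
      · rw [if_pos h2, if_pos h2]
        exact ⟨rfl, hnd, hhead, htail, hptr⟩
      · rw [if_neg h2, if_neg h2]
        by_cases h3 : cmd = "prev"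
        · rw [if_pos h3, if_pos h3]
          by_cases hc : s.val.contains (args.getD 0 "")
          · rw [if_pos hc]
            obtain ⟨k1, k2, hk, hx1, hx2⟩ := keys_split s.val _ hnd
              ((PySem.Dict.contains_iff_mem_keys s.val _).1 hc)
            have hchar := sm_prev_char s.val _ k1 k2 hc hk hx1
            obtain ⟨hp, -⟩ := hptr k1 _ k2 hk
            rw [hp]
            cases hlast : k1.getLast? with
            | none =>
              rw [hlast] at hchar
              refine ⟨?_, hnd, hhead, htail, hptr⟩
              rw [hchar]
            | some p =>
              rw [hlast] at hchar
              refine ⟨?_, hnd, hhead, htail, hptr⟩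
              rw [hchar]
          · rw [if_neg hc]
            simp only [Bool.not_eq_true] at hc
            refine ⟨?_, hnd, hhead, htail, hptr⟩
            have hv : sm_prev s.val s.val.keys (args.getD 0 "") = "<none>" := by simp only [sm_prev, hc]; simp
            rw [hv]
        · rw [if_neg h3, if_neg h3]
          by_cases h4 : cmd = "next"
          · rw [if_pos h4, if_pos h4]
            by_cases hc : s.val.contains (args.getD 0 "")
            · rw [if_pos hc]
              obtain ⟨k1, k2, hk, hx1, hx2⟩ := keys_split s.val _ hnd
                ((PySem.Dict.contains_iff_mem_keys s.val _).1 hc)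
              have hchar := sm_next_char s.val _ k1 k2 hc hk hx1
              obtain ⟨-, hn⟩ := hptr k1 _ k2 hk
              rw [hn]
              cases hh : k2.head? with
              | none =>
                rw [hh] at hchar
                refine ⟨?_, hnd, hhead, htail, hptr⟩
                rw [hchar]
              | some n =>
                rw [hh] at hchar
                refine ⟨?_, hnd, hhead, htail, hptr⟩
                rw [hchar]
            · rw [if_neg hc]
              simp only [Bool.not_eq_true] at hc
              refine ⟨?_, hnd, hhead, htail, hptr⟩
              have hv : sm_next s.val s.val.keys (args.getD 0 "") = "<none>" := by simp only [sm_next, hc]; simp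
              rw [hv]
          · rw [if_neg h4, if_neg h4]
            by_cases h5 : cmd = "delete"
            · rw [if_pos h5, if_pos h5]
              by_cases hc : s.val.contains (args.getD 0 "")
              · rw [if_pos hc]
                obtain ⟨k1, k2, hk, hx1, hx2⟩ := keys_split s.val _ hnd
                  ((PySem.Dict.contains_iff_mem_keys s.val _).1 hc)
                obtain ⟨hp, hn⟩ := hptr k1 _ k2 hk
                have hndk := hnd
                rw [hk] at hndk
                rcases List.nodup_append.mp hndk with ⟨hnd1, hnd2', hdisj⟩
                obtain ⟨hxk2, hnd2⟩ := List.nodup_cons.mp hnd2'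
                have hkeq : (s.val.erase (args.getD 0 "")).keys = k1 ++ k2 := by
                  rw [keys_erase, hk, List.filter_append, List.filter_cons]
                  simp only [beq_self_eq_true, Bool.not_true, Bool.false_eq_true, if_false]
                  rw [List.filter_eq_self.mpr (by
                      intro a ha; simp only [Bool.not_eq_eq_eq_not, Bool.not_true,
                        beq_eq_false_iff_ne]; exact fun e => hx1 (e ▸ ha)),
                    List.filter_eq_self.mpr (by
                      intro a ha; simp only [Bool.not_eq_eq_eq_not, Bool.not_true,
                        beq_eq_false_iff_ne]; exact fun e => hx2 (e ▸ ha))]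
                have hv : sm_delete s.val s.val.keys (args.getD 0 "") =
                    (s.val.erase (args.getD 0 ""), k1 ++ k2) := by
                  simp only [sm_delete, hc, if_pos]
                  rw [PySem.List.remove?_eq_some_erase s.val.keys (args.getD 0 "")
                    (by rw [hk]; simp)]
                  rw [Option.getD_some, hk, List.erase_append_right _ hx1,
                    List.erase_cons_head]
                refine ⟨?_, ?_, ?_, ?_, ?_⟩
                · dsimp only
                  rw [hv, hkeq]
                · dsimp only
                  rw [hkeq]
                  exact hnd1.append hnd2 (by intro a ha hb; exact hdisj a ha a (by simp [hb]) rfl)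
                · -- head
                  dsimp only
                  rw [hkeq, hp]
                  cases hk1 : k1 with
                  | nil =>
                    rw [List.getLast?_nil]
                    rw [hn]
                    rfl
                  | cons c t =>
                    rw [getLast?_of_cons]
                    rw [hhead, hk, hk1]
                    rfl
                · -- tail
                  dsimp only
                  rw [hkeq, hn]
                  cases hk2c : k2 with
                  | nil =>
                    rw [List.head?_nil, hp]
                    simp
                  | cons n0 r =>
                    rw [List.head?_cons, htail, hk, hk2c]
                    rw [List.getLast?_append_of_ne_nil _ (by simp),
                      List.getLast?_append_of_ne_nil _ (by simp)]
                    rw [show (args.getD 0 "" :: n0 :: r).getLast? = (n0 :: r).getLast? by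
                      rw [show args.getD 0 "" :: n0 :: r = [args.getD 0 ""] ++ n0 :: r from rfl,
                        List.getLast?_append_of_ne_nil _ (by simp)]]
                · -- pointers
                  dsimp only
                  rw [hkeq]
                  intro a y b hsplit
                  have hyx_of_k1 : ∀ z ∈ k1, z ≠ args.getD 0 "" :=
                    fun z hz => hdisj z hz _ (by simp) 
                  rcases middle_split k1 k2 a y b hsplit with ⟨b', hk1, hb⟩ | ⟨a', hk2, ha⟩
                  · -- y inside k1
                    have hymem : y ∈ k1 := by rw [hk1]; simp
                    have hyx : y ≠ args.getD 0 "" := hyx_of_k1 y hymem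
                    obtain ⟨hpy, hny⟩ := hptr a y (b' ++ args.getD 0 "" :: k2)
                      (by rw [hk, hk1]; simp)
                    constructor
                    · rw [hn]
                      cases hk2c : k2 with
                      | nil =>
                        rw [List.head?_nil, getD_erase_of_ne _ _ _ _ _ hyx, hpy]
                      | cons n0 r =>
                        have hyn0 : y ≠ n0 := hdisj y hymem n0 (by simp [hk2c])
                        rw [List.head?_cons, PySem.Dict.getD_insert, if_neg hyn0,
                          getD_erase_of_ne _ _ _ _ _ hyx, hpy]
                    · rw [hp]
                      subst hb
                      cases hb' : b' with
                      | nil =>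
                        have hgl : k1.getLast? = some y := by
                          rw [hk1, hb', List.getLast?_append_of_ne_nil _ (by simp)]
                          rfl
                        rw [hgl, PySem.Dict.getD_insert, if_pos rfl, hn]
                        rfl
                      | cons c t =>
                        have hglm : (c :: t).getLast (by simp) ∈ c :: t := List.getLast_mem _
                        have hgl : k1.getLast? = some ((c :: t).getLast (by simp)) := by
                          rw [hk1, hb', List.getLast?_append_of_ne_nil _ (by simp),
                            show y :: c :: t = [y] ++ c :: t from rfl,
                            List.getLast?_append_of_ne_nil _ (by simp), getLast?_of_cons]
                        have hyg : y ≠ (c :: t).getLast (by simp) := by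
                          have hndk1 := hnd1
                          rw [hk1, hb'] at hndk1
                          rcases List.nodup_append.mp hndk1 with ⟨-, h2, -⟩
                          have := (List.nodup_cons.mp h2).1
                          exact fun e => this (e ▸ hglm)
                        rw [hgl, PySem.Dict.getD_insert, if_neg hyg,
                          getD_erase_of_ne _ _ _ _ _ hyx, hny, hb']
                        rfl
                  · -- y inside k2
                    have hymem : y ∈ k2 := by rw [hk2]; simp
                    have hyx : y ≠ args.getD 0 "" := fun e => hx2 (e ▸ hymem)
                    obtain ⟨hpy, hny⟩ := hptr (k1 ++ args.getD 0 "" :: a') y b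
                      (by rw [hk, hk2]; simp)
                    subst ha
                    constructor
                    · rw [hn, hk2]
                      cases ha' : a' with
                      | nil =>
                        rw [List.nil_append, List.head?_cons, PySem.Dict.getD_insert,
                          if_pos rfl, hp]
                        simp
                      | cons c t =>
                        have hycl : y ≠ c := by
                          have hndk2 := hnd2
                          rw [hk2, ha'] at hndk2
                          rcases List.nodup_append.mp hndk2 with ⟨-, -, hd2⟩
                          exact Ne.symm (hd2 c (by simp) y (by simp))
                        rw [List.cons_append, List.head?_cons, PySem.Dict.getD_insert,
                          if_neg hycl, getD_erase_of_ne _ _ _ _ _ hyx, hpy, ha']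
                        rw [List.getLast?_append_of_ne_nil _ (by simp),
                          List.getLast?_append_of_ne_nil _ (by simp),
                          show args.getD 0 "" :: c :: t = [args.getD 0 ""] ++ c :: t from rfl,
                          List.getLast?_append_of_ne_nil _ (by simp)]
                    · rw [hp]
                      cases hk1 : k1 with
                      | nil =>
                        rw [List.getLast?_nil, getD_erase_of_ne _ _ _ _ _ hyx, hny]
                      | cons c t =>
                        rw [getLast?_of_cons]
                        have hglm : (c :: t).getLast (by simp) ∈ k1 := by
                          rw [hk1]; exact List.getLast_mem _
                        have hgy : y ≠ (c :: t).getLast (by simp) := fun e =>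
                          (hdisj _ hglm y (by simp [hk2])) e.symm
                        rw [PySem.Dict.getD_insert, if_neg hgy,
                          getD_erase_of_ne _ _ _ _ _ hyx, hny]
              · rw [if_neg hc]
                simp only [Bool.not_eq_true] at hc
                refine ⟨?_, hnd, hhead, htail, hptr⟩
                have hv : sm_delete s.val s.val.keys (args.getD 0 "") = (s.val, s.val.keys) := by
                  simp only [sm_delete, hc]; simp
                rw [hv]
            · rw [if_neg h5, if_neg h5]
              exact ⟨rfl, hnd, hhead, htail, hptr⟩

lemma loop_sim (ops : List (List String)) :
    ∀ (s : LLState), s.val.keys.Nodup → LLInv s.val.keys s →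
      ops.foldl aStep (s.val, s.val.keys, s.res) =
        ((ops.foldl bStep s).val, (ops.foldl bStep s).val.keys, (ops.foldl bStep s).res) := by
  induction ops with
  | nil => intro s _ _; rfl
  | cons op ops ih =>
    intro s hnd hinv
    obtain ⟨h1, h2, h3⟩ := step_sim s op hnd hinv
    simp only [List.foldl_cons, h1]
    exact ih (bStep s op) h2 h3

-- ===== VERDICT (by name: the statement is the Claim_ definition above) =====
theorem execute_operations_spec : Claim_equal_execute_operations := by
  intro ops _ _
  show execute_operations ops = execute_operations_alt ops
  unfold execute_operations execute_operations_alt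
  have h := loop_sim ops ⟨PySem.Dict.empty, PySem.Dict.empty, PySem.Dict.empty, none, none, []⟩
    (by simp) (by refine ⟨by simp, by simp, ?_⟩; intro l1 x l2 h; simp at h)
  simp only [PySem.Dict.keys_empty] at h
  rw [h]
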